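-- pv_equiv track=rewrite | github.com/KouroshSimpkins/Coding_2 | unaryNot.py | get_not_val
-- ===== SOURCE A (Python) =====
-- def get_binary(val):
--     """Return the binary value of a letter"""
--     return ord(val)
--
-- def get_not_val(val):
--     """Return the not value of a letter"""
--     binary = bin(get_binary(val))[2:]
--     not_binary = []
--     for i in range(len(binary)): # pylint: disable=consider-using-enumerate
--         if binary[i] == "0":
--             not_binary.append("1")
--         else:
--             not_binary.append("0")
--     return int("".join(not_binary), 2)
-- ===== SOURCE B (Python) =====
-- def get_not_val(val):
--     """Return the not value of a letter"""
--     n = ord(val)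
--     bits = n.bit_length() or 1
--     return n ^ ((1 << bits) - 1)
-- ===== Notes on version B (the rewrite author's own statement) =====
-- stated objective: simpler
-- what changed: Replaces the binary-string flip loop (bin, per-character list building, join, int(...,2)) with a closed-form mask-and-XOR over the bit width: n ^ ((1 << (n.bit_length() or 1)) - 1).
import Mathlib
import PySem

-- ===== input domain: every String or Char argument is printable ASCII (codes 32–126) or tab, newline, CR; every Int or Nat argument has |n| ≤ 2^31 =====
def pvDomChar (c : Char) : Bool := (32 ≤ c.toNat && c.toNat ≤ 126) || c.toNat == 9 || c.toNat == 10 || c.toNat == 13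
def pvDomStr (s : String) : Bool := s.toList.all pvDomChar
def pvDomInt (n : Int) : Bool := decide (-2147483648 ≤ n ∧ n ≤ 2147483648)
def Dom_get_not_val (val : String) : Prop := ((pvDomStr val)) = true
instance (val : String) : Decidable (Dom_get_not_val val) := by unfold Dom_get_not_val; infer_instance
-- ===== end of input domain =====

-- B replaces A's binary-string flip loop with a closed-form mask-and-XOR over the bit width (simpler).


-- ===== PORT A =====
-- ord(val): some code point iff val is a single character (else Python raises TypeError)
def pyOrd (val : String) : Option Int :=
  match val.toList with
  | [c] => some (c.toNat : Int)
  | _ => none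

-- helper get_binary of A (ord)
def get_binary (val : String) : Option Int := pyOrd val

-- body of A after ord succeeded, on n = ord(val)
def pvCoreA (n : Int) : Int :=
  let binary : List Char := PySem.List.slice (PySem.Int.pyBin n).toList (some 2) none
  let notBinary : List Char :=
    (PySem.List.pyRange 0 (binary.length : Int) 1).foldl
      (fun acc i =>
        if PySem.List.pyGetD binary i ' ' = '0' then acc ++ ['1'] else acc ++ ['0']) []
  (PySem.Int.ofCharsBase? notBinary 2).getD 0

def get_not_val (val : String) : Int :=
  match get_binary val with
  | some n => pvCoreA n
  | none => 0

-- ===== PORT B =====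
-- body of B on n = ord(val): n ^ ((1 << (n.bit_length() or 1)) - 1)
def pvCoreB (n : Int) : Int :=
  let bits : Nat := if PySem.Int.bitLength n = 0 then 1 else PySem.Int.bitLength n
  Int.xor n ((1 <<< (bits : Int)) - 1)

def get_not_val_alt (val : String) : Int :=
  match val.toList with
  | [c] => pvCoreB (c.toNat : Int)
  | _ => 0

-- ===== PRECONDITION & SPEC =====
-- Pre_ excludes exactly the inputs where ord(val) raises TypeError: val not a single character.
def Pre_get_not_val (val : String) : Prop := val.toList.length = 1
instance (val : String) : Decidable (Pre_get_not_val val) := by unfold Pre_get_not_val; infer_instance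
def pvWitness_get_not_val : String := "A"

def Spec_get_not_val (val : String) (out : Int) : Prop := out = get_not_val_alt val
instance (val : String) (out : Int) : Decidable (Spec_get_not_val val out) := by unfold Spec_get_not_val; infer_instance

-- ===== CLAIM (what is proved, stated in full; the proofs are below) =====
def Claim_equal_get_not_val : Prop := ∀ (val : String), Dom_get_not_val val → Pre_get_not_val val → Spec_get_not_val val (get_not_val val)

-- ===== LEMMAS AND PROOFS =====
set_option maxRecDepth 4096 in
lemma pvCore_eq : ∀ n : Nat, n < 127 → pvCoreA (n : Int) = pvCoreB (n : Int) := by decide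

-- ===== VERDICT (by name: the statement is the Claim_ definition above) =====
theorem get_not_val_spec : Claim_equal_get_not_val := by
  intro val hdom hpre
  unfold Pre_get_not_val at hpre
  unfold Dom_get_not_val pvDomStr at hdom
  cases h : val.toList with
  | nil => simp [h] at hpre
  | cons c rest =>
    cases rest with
    | cons d t => simp [h] at hpre
    | nil =>
      have hc : pvDomChar c = true := by
        rw [h] at hdom; simpa using hdom
      have hlt : c.toNat < 127 := by
        unfold pvDomChar at hc
        simp only [Bool.or_eq_true, Bool.and_eq_true, decide_eq_true_eq, beq_iff_eq] at hc
        omega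
      show get_not_val val = get_not_val_alt val
      simp only [get_not_val, get_not_val_alt, get_binary, pyOrd, h]
      exact pvCore_eq c.toNat hlt
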